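-- pv_equiv track=rewrite | github.com/jungwookim/ps | boj/16935/a.py | func
-- ===== SOURCE A (Python) =====
-- def func(method, matrix):
--     row_size = len(matrix[0])
--     col_size = len(matrix)
--
--     if method == 1:
--         new_matrix = [[0 for _ in range(row_size)] for _ in range(col_size)]
--         for i in range(row_size):
--             for j in range(col_size):
--                 new_matrix[j][i] = matrix[-(j+1)][i]
--     elif method == 2:
--         new_matrix = [[0 for _ in range(row_size)] for _ in range(col_size)]
--         for i in range(row_size):
--             for j in range(col_size):
--                 new_matrix[j][i] = matrix[j][-(i+1)]
--     elif method == 3: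
--         new_matrix = [[0 for _ in range(col_size)] for _ in range(row_size)]
--         for i in range(row_size):
--             for j in range(col_size):
--                 new_matrix[i][-(j+1)] = matrix[j][i]
--     elif method == 4:
--         new_matrix = [[0 for _ in range(col_size)] for _ in range(row_size)]
--         for i in range(row_size):
--             for j in range(col_size):
--                 new_matrix[-(i+1)][j] = matrix[j][i]
--     elif method == 5:
--         new_matrix = [[0 for _ in range(row_size)] for _ in range(col_size)]
--         for j in range(col_size): # 0 ~ 5
--             for i in range(row_size): # 0~7
--                 row_line = row_size // 2 # 4
--                 col_line = col_size // 2 # 3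
--                 cell = matrix[j][i]
--                 if i < row_line and j < col_line: # 1
--                     new_matrix[j][i + row_line] = cell
--                 elif i >= row_line and j < col_line: # 2
--                     new_matrix[j + col_line][i] = cell
--                 elif i >= row_line and j >= col_line: # 3
--                     new_matrix[j][i - row_line] = cell
--                 else: # 4
--                     new_matrix[j - col_line][i] = cell
--
--     elif method == 6:
--         new_matrix = [[0 for _ in range(row_size)] for _ in range(col_size)]
--         for j in range(col_size): # 0 ~ 5
--             for i in range(row_size): # 0~7
--                 row_line = row_size // 2 # 4
--                 col_line = col_size // 2 # 3
--                 cell = matrix[j][i]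
--                 if i < row_line and j < col_line: # 1 to 4
--                     new_matrix[j + col_line][i] = cell
--                 elif i >= row_line and j < col_line: # 2 to 1
--                     new_matrix[j][i - row_line] = cell
--                 elif i >= row_line and j >= col_line: # 3 to 2
--                     new_matrix[j - col_line][i] = cell
--                 else: # 4 to 3
--                     new_matrix[j][i + row_line] = cell
--     return new_matrix
-- ===== SOURCE B (Python) =====
-- def func(method, matrix):
--     if method == 1:
--         return [list(row) for row in matrix[::-1]]
--     if method == 2:
--         return [row[::-1] for row in matrix]
--     if method == 3:
--         return [list(r) for r in zip(*matrix[::-1])]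
--     if method == 4:
--         return [list(r) for r in zip(*matrix)][::-1]
--     c2 = len(matrix) // 2
--     r2 = len(matrix[0]) // 2
--     if method == 5:
--         return ([matrix[j + c2][:r2] + matrix[j][:r2] for j in range(c2)]
--                 + [matrix[j][r2:] + matrix[j - c2][r2:] for j in range(c2, len(matrix))])
--     if method == 6:
--         return ([matrix[j][r2:] + matrix[j + c2][r2:] for j in range(c2)]
--                 + [matrix[j - c2][:r2] + matrix[j][:r2] for j in range(c2, len(matrix))])
--     raise ValueError("unknown method")
-- ===== Notes on version B (the rewrite author's own statement) =====
-- stated objective: idiomatic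
-- what changed: Each per-cell index-scatter double loop is replaced by whole-structure operations: list reversal for method 1, per-row reversal for method 2, zip-based transposes for methods 3/4, and quadrant reassembly from row slices (take/drop at the //2 boundaries) for methods 5/6.
-- outside the precondition, e.g. on func(2, [[1, 2], [3, 4, 5]]): A returns [[2, 1], [5, 4]], B returns [[2, 1], [5, 4, 3]]; on func(1, []): A raises IndexError, B returns []
import Mathlib
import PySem

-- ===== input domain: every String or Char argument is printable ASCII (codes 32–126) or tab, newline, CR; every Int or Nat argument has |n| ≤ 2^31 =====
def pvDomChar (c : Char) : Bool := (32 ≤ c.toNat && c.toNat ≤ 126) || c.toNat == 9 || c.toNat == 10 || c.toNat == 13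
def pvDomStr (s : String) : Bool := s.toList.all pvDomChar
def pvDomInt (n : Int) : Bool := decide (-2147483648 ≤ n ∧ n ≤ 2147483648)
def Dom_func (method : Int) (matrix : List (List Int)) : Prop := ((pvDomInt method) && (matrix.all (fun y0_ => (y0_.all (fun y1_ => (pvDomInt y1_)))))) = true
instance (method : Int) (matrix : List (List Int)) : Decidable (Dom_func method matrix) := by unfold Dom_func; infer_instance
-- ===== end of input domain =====

-- B replaces A's per-cell index-scatter loops by whole-row slicing / transpose / block reassembly (idiomatic rewrite; same asymptotic cost).


-- ===== PORT A =====
-- matrix[r][c]  (Int indices, Python negative-index rule; total form used under Pre_, all reads in range there)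
def pvGetCell (m : List (List Int)) (r c : Int) : Int :=
  PySem.List.pyGetD (PySem.List.pyGetD m r []) c 0

-- matrix[r][c] = v  (Python reads the row object and mutates it in place; all writes in range under Pre_)
def pvSetCell (m : List (List Int)) (r c : Int) (v : Int) : List (List Int) :=
  PySem.List.pySetD m r (PySem.List.pySetD (PySem.List.pyGetD m r []) c v)

-- [[0 for _ in range(cols)] for _ in range(rows)]
def pvZeros (rows cols : Nat) : List (List Int) :=
  (List.range rows).map (fun _ => (List.range cols).map (fun _ => (0 : Int)))

def func (method : Int) (matrix : List (List Int)) : List (List Int) :=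
  let row_size := (PySem.List.pyGetD matrix 0 []).length   -- len(matrix[0]); IndexError on [] is excluded by Pre_
  let col_size := matrix.length
  if method = 1 then
    (List.range row_size).foldl (fun nm (i : Nat) =>
      (List.range col_size).foldl (fun nm (j : Nat) =>
        pvSetCell nm ↑j ↑i (pvGetCell matrix (-(↑j + 1)) ↑i)) nm)
      (pvZeros col_size row_size)
  else if method = 2 then
    (List.range row_size).foldl (fun nm (i : Nat) =>
      (List.range col_size).foldl (fun nm (j : Nat) =>
        pvSetCell nm ↑j ↑i (pvGetCell matrix ↑j (-(↑i + 1)))) nm)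
      (pvZeros col_size row_size)
  else if method = 3 then
    (List.range row_size).foldl (fun nm (i : Nat) =>
      (List.range col_size).foldl (fun nm (j : Nat) =>
        pvSetCell nm ↑i (-(↑j + 1)) (pvGetCell matrix ↑j ↑i)) nm)
      (pvZeros row_size col_size)
  else if method = 4 then
    (List.range row_size).foldl (fun nm (i : Nat) =>
      (List.range col_size).foldl (fun nm (j : Nat) =>
        pvSetCell nm (-(↑i + 1)) ↑j (pvGetCell matrix ↑j ↑i)) nm)
      (pvZeros row_size col_size)
  else if method = 5 then
    (List.range col_size).foldl (fun nm (j : Nat) =>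
      (List.range row_size).foldl (fun nm (i : Nat) =>
        let row_line := row_size / 2
        let col_line := col_size / 2
        let cell := pvGetCell matrix ↑j ↑i
        if i < row_line ∧ j < col_line then
          pvSetCell nm ↑j (↑i + ↑row_line) cell
        else if row_line ≤ i ∧ j < col_line then
          pvSetCell nm (↑j + ↑col_line) ↑i cell
        else if row_line ≤ i ∧ col_line ≤ j then
          pvSetCell nm ↑j (↑i - ↑row_line) cell
        else
          pvSetCell nm (↑j - ↑col_line) ↑i cell) nm)
      (pvZeros col_size row_size)
  else if method = 6 then
    (List.range col_size).foldl (fun nm (j : Nat) =>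
      (List.range row_size).foldl (fun nm (i : Nat) =>
        let row_line := row_size / 2
        let col_line := col_size / 2
        let cell := pvGetCell matrix ↑j ↑i
        if i < row_line ∧ j < col_line then
          pvSetCell nm (↑j + ↑col_line) ↑i cell
        else if row_line ≤ i ∧ j < col_line then
          pvSetCell nm ↑j (↑i - ↑row_line) cell
        else if row_line ≤ i ∧ col_line ≤ j then
          pvSetCell nm (↑j - ↑col_line) ↑i cell
        else
          pvSetCell nm ↑j (↑i + ↑row_line) cell) nm)
      (pvZeros col_size row_size)
  else []   -- Python raises UnboundLocalError for any other method; excluded by Pre_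

-- ===== PORT B =====
-- models Python's builtin zip(*rows) (as lists): truncates at the shortest row
def pvZip (rows : List (List Int)) : List (List Int) :=
  (List.range ((rows.map List.length).min?.getD 0)).map (fun i => rows.map (fun row => row.getD i 0))

def func_alt (method : Int) (matrix : List (List Int)) : List (List Int) :=
  if method = 1 then
    ((PySem.List.slice? matrix none none (-1)).getD []).map (fun row => row)
  else if method = 2 then
    matrix.map (fun row => (PySem.List.slice? row none none (-1)).getD [])
  else if method = 3 then
    pvZip ((PySem.List.slice? matrix none none (-1)).getD [])
  else if method = 4 then
    (PySem.List.slice? (pvZip matrix) none none (-1)).getD []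
  else
    let c2 : Int := (matrix.length / 2 : Nat)
    let r2 : Int := ((PySem.List.pyGetD matrix 0 []).length / 2 : Nat)
    if method = 5 then
      (PySem.List.pyRange 0 c2 1).map (fun j =>
          PySem.List.slice (PySem.List.pyGetD matrix (j + c2) []) none (some r2)
          ++ PySem.List.slice (PySem.List.pyGetD matrix j []) none (some r2))
      ++ (PySem.List.pyRange c2 (matrix.length : Int) 1).map (fun j =>
          PySem.List.slice (PySem.List.pyGetD matrix j []) (some r2) none
          ++ PySem.List.slice (PySem.List.pyGetD matrix (j - c2) []) (some r2) none)
    else if method = 6 then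
      (PySem.List.pyRange 0 c2 1).map (fun j =>
          PySem.List.slice (PySem.List.pyGetD matrix j []) (some r2) none
          ++ PySem.List.slice (PySem.List.pyGetD matrix (j + c2) []) (some r2) none)
      ++ (PySem.List.pyRange c2 (matrix.length : Int) 1).map (fun j =>
          PySem.List.slice (PySem.List.pyGetD matrix (j - c2) []) none (some r2)
          ++ PySem.List.slice (PySem.List.pyGetD matrix j []) none (some r2))
    else []   -- Python raises ValueError for any other method; excluded by Pre_

-- ===== PRECONDITION & SPEC =====
-- Pre_ excludes: the empty matrix and any method outside 1..6, where A raises (IndexError / UnboundLocalError);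
-- ragged matrices, where A raises IndexError when some row is shorter than row 0 and, when rows are longer,
-- A's silent truncation to row 0's width is an accident as defensible as B's whole-row slicing; and, for
-- methods 5/6 only, matrices with an odd number of rows or columns, where the quadrant shift is non-bijective
-- and A's per-cell writes leave accidental zero cells and overwrites (BOJ 16935 guarantees even dimensions).
def Pre_func (method : Int) (matrix : List (List Int)) : Prop :=
  1 ≤ method ∧ method ≤ 6 ∧ matrix ≠ [] ∧
  (∀ row ∈ matrix, row.length = (matrix.headI).length) ∧
  ((method = 5 ∨ method = 6) → matrix.length % 2 = 0 ∧ (matrix.headI).length % 2 = 0)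
instance (method : Int) (matrix : List (List Int)) : Decidable (Pre_func method matrix) := by
  unfold Pre_func; infer_instance

def pvWitness_func : Int × List (List Int) := (5, [[1, 2], [3, 4]])

def Spec_func (method : Int) (matrix : List (List Int)) (out : List (List Int)) : Prop := out = func_alt method matrix
instance (method : Int) (matrix : List (List Int)) (out : List (List Int)) : Decidable (Spec_func method matrix out) := by unfold Spec_func; infer_instance

-- ===== CLAIM (what is proved, stated in full; the proofs are below) =====
def Claim_equal_func : Prop := ∀ (method : Int) (matrix : List (List Int)), Dom_func method matrix → Pre_func method matrix → Spec_func method matrix (func method matrix)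

-- ===== LEMMAS AND PROOFS =====

-- value of cell (r, c), Nat indices (proof-side view)
def gv (m : List (List Int)) (r c : Nat) : Int := (m.getD r []).getD c 0

-- one in-range write, Nat indices
def app (m : List (List Int)) (w : (Nat × Nat) × Int) : List (List Int) :=
  m.set w.1.1 ((m.getD w.1.1 []).set w.1.2 w.2)

-- the write list produced by a doubly nested loop
def grid (A B : Nat) (f : Nat → Nat → (Nat × Nat) × Int) : List ((Nat × Nat) × Int) :=
  (List.range A).flatMap (fun x => (List.range B).map (f x))

theorem length_app (m : List (List Int)) (w : (Nat × Nat) × Int) : (app m w).length = m.length := by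
  simp [app]

theorem rowlen_app (m : List (List Int)) (w : (Nat × Nat) × Int) (r : Nat) :
    ((app m w).getD r []).length = (m.getD r []).length := by
  unfold app
  rw [List.getD_eq_getElem?_getD, List.getElem?_set]
  by_cases h : w.1.1 = r
  · subst h
    by_cases hlt : w.1.1 < m.length
    · simp [hlt]
    · have hnone : m[w.1.1]? = none := List.getElem?_eq_none_iff.mpr (by omega)
      simp [hlt, List.getD_eq_getElem?_getD, hnone]
  · simp [h, List.getD_eq_getElem?_getD]

theorem gv_app (m : List (List Int)) (w : (Nat × Nat) × Int) (r c : Nat)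
    (hr : r < m.length) (hc : c < (m.getD r []).length) :
    gv (app m w) r c = if w.1.1 = r ∧ w.1.2 = c then w.2 else gv m r c := by
  unfold gv app
  rw [List.getD_eq_getElem?_getD (l := m.set _ _), List.getElem?_set]
  by_cases h : w.1.1 = r
  · subst h
    simp only [if_pos rfl, hr, if_pos, Option.getD_some, true_and]
    rw [List.getD_eq_getElem?_getD (l := (m.getD w.1.1 []).set w.1.2 w.2), List.getElem?_set]
    by_cases h2 : w.1.2 = c
    · subst h2
      have hc2 : w.1.2 < (m[w.1.1]?.getD []).length := by
        rwa [← List.getD_eq_getElem?_getD]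
      simp [hc2]
    · simp [h2, List.getD_eq_getElem?_getD]
  · simp [h, List.getD_eq_getElem?_getD]

theorem length_foldl_app (l : List ((Nat × Nat) × Int)) (m : List (List Int)) :
    (l.foldl app m).length = m.length := by
  induction l generalizing m with
  | nil => rfl
  | cons w l ih => simpa [List.foldl_cons, length_app] using (ih (app m w)).trans (length_app m w)

theorem rowlen_foldl_app (l : List ((Nat × Nat) × Int)) (m : List (List Int)) (r : Nat) :
    ((l.foldl app m).getD r []).length = (m.getD r []).length := by
  induction l generalizing m with
  | nil => rfl
  | cons w l ih => simpa [List.foldl_cons] using (ih (app m w)).trans (rowlen_app m w r)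

theorem gv_foldl_app (l : List ((Nat × Nat) × Int)) (m : List (List Int)) (r c : Nat)
    (hr : r < m.length) (hc : c < (m.getD r []).length) :
    gv (l.foldl app m) r c =
      (((l.filter (fun w => w.1 == (r, c))).getLast?).map (fun w => w.2)).getD (gv m r c) := by
  induction l using List.reverseRecOn with
  | nil => simp
  | append_singleton l w ih =>
    rw [List.foldl_append, List.foldl_cons, List.foldl_nil, List.filter_append]
    rw [gv_app _ _ _ _ (by rw [length_foldl_app]; exact hr) (by rw [rowlen_foldl_app]; exact hc)]
    by_cases h : w.1 = (r, c)
    · have hcomp : w.1.1 = r ∧ w.1.2 = c := by rw [h]; exact ⟨rfl, rfl⟩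
      simp [List.filter_cons, h, hcomp]
    · have hne : ¬(w.1.1 = r ∧ w.1.2 = c) := by
        intro ⟨h1, h2⟩; exact h (Prod.ext h1 h2)
      have hbf : (w.1 == (r, c)) = false := by simpa using h
      simp [List.filter_cons, hbf, hne, ih]

theorem foldl_grid (A B : Nat) (f : Nat → Nat → (Nat × Nat) × Int) (m0 : List (List Int)) :
    (grid A B f).foldl app m0
      = (List.range A).foldl (fun acc x => (List.range B).foldl (fun acc2 y => app acc2 (f x y)) acc) m0 := by
  simp [grid, List.foldl_flatMap, List.foldl_map]

theorem filter_map_range_single {beta : Type} (p : beta → Bool) (g : Nat → beta) (B y0 : Nat)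
    (hy : y0 < B) (h : ∀ y, y < B → (p (g y) = true ↔ y = y0)) :
    ((List.range B).map g).filter p = [g y0] := by
  induction B with
  | zero => omega
  | succ n ih =>
    rw [List.range_succ, List.map_append, List.filter_append]
    by_cases hy0 : y0 = n
    · have hnil : ((List.range n).map g).filter p = [] := by
        rw [List.filter_eq_nil_iff]
        intro a ha
        obtain ⟨y, hyn, rfl⟩ := List.mem_map.mp ha
        rw [List.mem_range] at hyn
        rw [h y (by omega)]; omega
      have hpn : p (g n) = true := (h n (by omega)).mpr hy0.symm
      simp [hnil, hpn, hy0]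
    · have hpn : p (g n) = false := by
        rcases Bool.eq_false_or_eq_true (p (g n)) with ht | hf
        · exact absurd ((h n (by omega)).mp ht) (by omega)
        · exact hf
      rw [ih (by omega) (fun y hy2 => h y (by omega))]
      simp [hpn]

theorem filter_grid_single (A B : Nat) (f : Nat → Nat → (Nat × Nat) × Int)
    (p : (Nat × Nat) × Int → Bool) (x0 y0 : Nat) (hx : x0 < A) (hy : y0 < B)
    (h : ∀ x, x < A → ∀ y, y < B → (p (f x y) = true ↔ (x = x0 ∧ y = y0))) :
    (grid A B f).filter p = [f x0 y0] := by
  unfold grid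
  rw [List.filter_flatMap]
  induction A with
  | zero => omega
  | succ n ih =>
    rw [List.range_succ, List.flatMap_append]
    by_cases hx0 : x0 = n
    · have hnil : (List.range n).flatMap (fun x => ((List.range B).map (f x)).filter p) = [] := by
        rw [List.flatMap_eq_nil_iff]
        intro x hxmem
        rw [List.mem_range] at hxmem
        rw [List.filter_eq_nil_iff]
        intro a ha
        obtain ⟨y, hyB, rfl⟩ := List.mem_map.mp ha
        rw [List.mem_range] at hyB
        rw [h x (by omega) y hyB]; omega
      rw [hnil]
      subst hx0
      simp only [List.flatMap_cons, List.flatMap_nil, List.nil_append, List.append_nil]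
      exact filter_map_range_single p (f x0) B y0 hy (fun y hy2 => by
        rw [h x0 (by omega) y hy2]; omega)
    · have hlast : ((List.range B).map (f n)).filter p = [] := by
        rw [List.filter_eq_nil_iff]
        intro a ha
        obtain ⟨y, hyB, rfl⟩ := List.mem_map.mp ha
        rw [List.mem_range] at hyB
        rw [h n (by omega) y hyB]; omega
      rw [ih (by omega) (fun x hx2 => h x (by omega))]
      simp [hlast]

theorem gv_grid_foldl (A B : Nat) (f : Nat → Nat → (Nat × Nat) × Int) (m0 : List (List Int))
    (r c x0 y0 : Nat) (hr : r < m0.length) (hc : c < (m0.getD r []).length)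
    (hx : x0 < A) (hy : y0 < B)
    (h : ∀ x, x < A → ∀ y, y < B → ((f x y).1 = (r, c) ↔ (x = x0 ∧ y = y0))) :
    gv ((grid A B f).foldl app m0) r c = (f x0 y0).2 := by
  rw [gv_foldl_app _ _ _ _ hr hc,
    filter_grid_single A B f _ x0 y0 hx hy (fun x hx2 y hy2 => by
      rw [beq_iff_eq]; exact h x hx2 y hy2)]
  simp

theorem foldl_congr_inv {alpha beta : Type} (l : List beta) (f g : alpha → beta → alpha)
    (P : alpha → Prop) (init : alpha) (h0 : P init)
    (hg : ∀ a b, P a → b ∈ l → P (g a b))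
    (hfg : ∀ a b, P a → b ∈ l → f a b = g a b) :
    l.foldl f init = l.foldl g init := by
  induction l generalizing init with
  | nil => rfl
  | cons b l ih =>
    rw [List.foldl_cons, List.foldl_cons, hfg init b h0 List.mem_cons_self]
    exact ih (g init b) (hg init b h0 List.mem_cons_self)
      (fun a b2 ha hb2 => hg a b2 ha (List.mem_cons_of_mem _ hb2))
      (fun a b2 ha hb2 => hfg a b2 ha (List.mem_cons_of_mem _ hb2))

-- shape invariant used while converting A's loops to a grid of writes
def pvShape (R C : Nat) (m : List (List Int)) : Prop :=
  m.length = R ∧ ∀ r : Nat, r < R → (m.getD r []).length = C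

theorem pvShape_app (R C : Nat) (m : List (List Int)) (w : (Nat × Nat) × Int)
    (h : pvShape R C m) : pvShape R C (app m w) := by
  obtain ⟨h1, h2⟩ := h
  exact ⟨by rw [length_app]; exact h1, fun r hr => by rw [rowlen_app]; exact h2 r hr⟩

theorem nested_eq_grid (A B R C : Nat) (body : List (List Int) → Nat → Nat → List (List Int))
    (f : Nat → Nat → (Nat × Nat) × Int) (m0 : List (List Int)) (h0 : pvShape R C m0)
    (hbody : ∀ nm x y, pvShape R C nm → x < A → y < B → body nm x y = app nm (f x y)) :
    (List.range A).foldl (fun nm x => (List.range B).foldl (fun nm y => body nm x y) nm) m0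
      = (grid A B f).foldl app m0 := by
  rw [foldl_grid]
  apply foldl_congr_inv _ _ _ (pvShape R C) _ h0
  · intro a x ha hx
    have : ∀ (l : List Nat) (m : List (List Int)), pvShape R C m →
        pvShape R C (l.foldl (fun acc2 y => app acc2 (f x y)) m) := by
      intro l
      induction l with
      | nil => intro m hm; exact hm
      | cons y l ih => intro m hm; exact ih _ (pvShape_app _ _ _ _ hm)
    exact this _ a ha
  · intro a x ha hx
    apply foldl_congr_inv _ _ _ (pvShape R C) _ ha
    · intro m y hm hy; exact pvShape_app _ _ _ _ hm
    · intro m y hm hy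
      exact hbody m x y hm (List.mem_range.mp hx) (List.mem_range.mp hy)

theorem pvShape_zeros (R C : Nat) : pvShape R C (pvZeros R C) := by
  constructor
  · simp [pvZeros]
  · intro r hr
    simp [pvZeros, List.getD_eq_getElem?_getD, List.getElem?_map, List.getElem?_range, hr]

theorem ext_gv (m1 m2 : List (List Int)) (hlen : m1.length = m2.length)
    (hrow : ∀ r, r < m1.length → (m1.getD r []).length = (m2.getD r []).length)
    (hval : ∀ r c, r < m1.length → c < (m1.getD r []).length → gv m1 r c = gv m2 r c) :
    m1 = m2 := by
  apply List.ext_getElem hlen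
  intro r h1 h2
  have hd1 : m1.getD r [] = m1[r] := by
    rw [List.getD_eq_getElem?_getD, List.getElem?_eq_getElem h1]; rfl
  have hd2 : m2.getD r [] = m2[r] := by
    rw [List.getD_eq_getElem?_getD, List.getElem?_eq_getElem h2]; rfl
  apply List.ext_getElem
  · rw [← hd1, ← hd2]; exact hrow r h1
  · intro c hc1 hc2
    have := hval r c h1 (by rw [hd1]; exact hc1)
    unfold gv at this
    rw [hd1, hd2] at this
    rw [List.getD_eq_getElem?_getD, List.getD_eq_getElem?_getD,
      List.getElem?_eq_getElem hc1, List.getElem?_eq_getElem hc2] at this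
    exact this

-- pySetD with an in-range negative index
theorem pySetD_neg_natCast {alpha : Type} (xs : List alpha) (k : Nat) (v : alpha) (h1 : 0 < k) (h2 : k ≤ xs.length) :
    PySem.List.pySetD xs (-(k : Int)) v = xs.set (xs.length - k) v := by
  unfold PySem.List.pySetD PySem.List.pySet? PySem.List.pyIdx?
  rw [if_neg (by omega), if_pos (by omega : -(xs.length : Int) ≤ -(k : Int))]
  simp only [Option.map_some, Option.getD_some]
  congr 1
  omega



-- context facts
theorem rect_rowlen (matrix : List (List Int)) (hne : matrix ≠ [])
    (hrect : ∀ row ∈ matrix, row.length = matrix.headI.length) (r : Nat) (hr : r < matrix.length) :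
    (matrix.getD r []).length = matrix.headI.length := by
  have : matrix.getD r [] ∈ matrix := by
    rw [List.getD_eq_getElem?_getD, List.getElem?_eq_getElem hr]
    exact List.getElem_mem hr
  exact hrect _ this

theorem headI_eq_getD (matrix : List (List Int)) (hne : matrix ≠ []) :
    matrix.headI = matrix.getD 0 [] := by
  cases matrix with
  | nil => exact absurd rfl hne
  | cons a l => rfl

theorem pyGetD_negsucc (matrix : List (List Int)) (j : Nat) (hj : j < matrix.length) :
    PySem.List.pyGetD matrix (-((j : Int) + 1)) [] = matrix.getD (matrix.length - 1 - j) [] := by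
  have h1 : (-((j : Int) + 1)) = -(((j + 1 : Nat) : Int)) := by push_cast; ring
  rw [h1, PySem.List.pyGetD_neg_natCast matrix (j + 1) [] (by omega) (by omega)]
  rw [List.getD_eq_getElem?_getD, List.getElem?_eq_getElem (by omega)]
  simp only [Option.getD_some]
  congr 1
  omega

theorem pyGetD_negsucc_row (row : List Int) (i : Nat) (hi : i < row.length) :
    PySem.List.pyGetD row (-((i : Int) + 1)) 0 = row.getD (row.length - 1 - i) 0 := by
  have h1 : (-((i : Int) + 1)) = -(((i + 1 : Nat) : Int)) := by push_cast; ring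
  rw [h1, PySem.List.pyGetD_neg_natCast row (i + 1) 0 (by omega) (by omega)]
  rw [List.getD_eq_getElem?_getD, List.getElem?_eq_getElem (by omega)]
  simp only [Option.getD_some]
  congr 1
  omega

theorem pvGetCell_natCast (matrix : List (List Int)) (r c : Nat) :
    pvGetCell matrix (r : Int) (c : Int) = gv matrix r c := by
  simp [pvGetCell, gv]

theorem pvSetCell_natCast (nm : List (List Int)) (r c : Nat) (v : Int) :
    pvSetCell nm (r : Int) (c : Int) v = app nm ((r, c), v) := by
  simp [pvSetCell, app]

theorem gv_reverse (matrix : List (List Int)) (r c : Nat) (hr : r < matrix.length) :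
    gv matrix.reverse r c = gv matrix (matrix.length - 1 - r) c := by
  unfold gv
  rw [List.getD_eq_getElem?_getD (l := matrix.reverse), List.getElem?_reverse (by simpa using hr),
    ← List.getD_eq_getElem?_getD]


theorem method1_eq (matrix : List (List Int)) (hne : matrix ≠ [])
    (hrect : ∀ row ∈ matrix, row.length = matrix.headI.length) :
    func 1 matrix = func_alt 1 matrix := by
  have hL := rect_rowlen matrix hne hrect
  rw [headI_eq_getD matrix hne] at hL
  have hAlt : func_alt 1 matrix = matrix.reverse := by
    simp only [func_alt]
    simp only [reduceIte]
    rw [PySem.List.slice?_none_none_neg_one]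
    simp
  have hA : func 1 matrix =
      (grid (matrix.getD 0 []).length matrix.length
        (fun i j => ((j, i), gv matrix (matrix.length - 1 - j) i))).foldl app
        (pvZeros matrix.length (matrix.getD 0 []).length) := by
    simp only [func]
    simp only [reduceIte]
    rw [PySem.List.pyGetD_zero]
    exact nested_eq_grid (matrix.getD 0 []).length matrix.length matrix.length (matrix.getD 0 []).length
      (fun (nm : List (List Int)) (i j : Nat) => pvSetCell nm ↑j ↑i (pvGetCell matrix (-(↑j + 1)) ↑i))
      (fun i j => ((j, i), gv matrix (matrix.length - 1 - j) i))
      (pvZeros matrix.length (matrix.getD 0 []).length)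
      (pvShape_zeros _ _)
      (by
        intro nm i j hnm hi hj
        beta_reduce
        unfold pvGetCell
        rw [pyGetD_negsucc matrix j hj, PySem.List.pyGetD_natCast]
        exact pvSetCell_natCast nm j i _)
  rw [hA, hAlt]
  apply ext_gv
  · rw [length_foldl_app]; simp [pvZeros]
  · intro r hr
    rw [length_foldl_app] at hr; simp [pvZeros] at hr
    rw [rowlen_foldl_app, (pvShape_zeros matrix.length (matrix.getD 0 []).length).2 r hr]
    rw [List.getD_eq_getElem?_getD (l := matrix.reverse), List.getElem?_reverse (by simpa using hr),
      ← List.getD_eq_getElem?_getD]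
    exact (hL _ (by omega)).symm
  · intro r c hr hc
    rw [length_foldl_app] at hr; simp [pvZeros] at hr
    rw [rowlen_foldl_app, (pvShape_zeros matrix.length (matrix.getD 0 []).length).2 r hr] at hc
    have hval := gv_grid_foldl (matrix.getD 0 []).length matrix.length
      (fun i j => ((j, i), gv matrix (matrix.length - 1 - j) i))
      (pvZeros matrix.length (matrix.getD 0 []).length) r c c r
      (by simp [pvZeros]; exact hr)
      (by rw [(pvShape_zeros matrix.length (matrix.getD 0 []).length).2 r hr]; exact hc)
      hc hr
      (by intro i hi j hj; simp only [Prod.mk.injEq]; constructor <;> (intro h; exact ⟨h.2, h.1⟩))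
    rw [hval, gv_reverse matrix r c hr]
theorem getD_map_rev (matrix : List (List Int)) (r : Nat) (hr : r < matrix.length) :
    (matrix.map (fun row : List Int => row.reverse)).getD r [] = (matrix.getD r []).reverse := by
  rw [List.getD_eq_getElem?_getD, List.getElem?_map, List.getElem?_eq_getElem hr,
    List.getD_eq_getElem?_getD, List.getElem?_eq_getElem hr]
  rfl

theorem getD_reverse_row (row : List Int) (c : Nat) (hc : c < row.length) :
    row.reverse.getD c 0 = row.getD (row.length - 1 - c) 0 := by
  rw [List.getD_eq_getElem?_getD, List.getElem?_reverse (by simpa using hc),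
    ← List.getD_eq_getElem?_getD]

theorem method2_eq (matrix : List (List Int)) (hne : matrix ≠ [])
    (hrect : ∀ row ∈ matrix, row.length = matrix.headI.length) :
    func 2 matrix = func_alt 2 matrix := by
  have hL := rect_rowlen matrix hne hrect
  rw [headI_eq_getD matrix hne] at hL
  have hAlt : func_alt 2 matrix = matrix.map (fun row => row.reverse) := by
    simp only [func_alt]
    norm_num
    simp only [PySem.List.slice?_none_none_neg_one, Option.getD_some]
    simp
  have hA : func 2 matrix =
      (grid (matrix.getD 0 []).length matrix.length
        (fun i j => ((j, i), gv matrix j ((matrix.getD 0 []).length - 1 - i)))).foldl app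
        (pvZeros matrix.length (matrix.getD 0 []).length) := by
    simp only [func, Int.reduceEq, reduceIte]
    rw [PySem.List.pyGetD_zero]
    exact nested_eq_grid (matrix.getD 0 []).length matrix.length matrix.length (matrix.getD 0 []).length
      (fun (nm : List (List Int)) (i j : Nat) => pvSetCell nm ↑j ↑i (pvGetCell matrix ↑j (-(↑i + 1))))
      (fun i j => ((j, i), gv matrix j ((matrix.getD 0 []).length - 1 - i)))
      (pvZeros matrix.length (matrix.getD 0 []).length)
      (pvShape_zeros _ _)
      (by
        intro nm i j hnm hi hj
        beta_reduce
        unfold pvGetCell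
        rw [PySem.List.pyGetD_natCast,
          pyGetD_negsucc_row _ i (by rw [hL j hj]; exact hi), hL j hj]
        exact pvSetCell_natCast nm j i _)
  rw [hA, hAlt]
  apply ext_gv
  · rw [length_foldl_app]; simp [pvZeros]
  · intro r hr
    rw [length_foldl_app] at hr; simp [pvZeros] at hr
    rw [rowlen_foldl_app, (pvShape_zeros matrix.length (matrix.getD 0 []).length).2 r hr,
      getD_map_rev matrix r hr]
    rw [List.length_reverse]
    exact (hL r hr).symm
  · intro r c hr hc
    rw [length_foldl_app] at hr; simp [pvZeros] at hr
    rw [rowlen_foldl_app, (pvShape_zeros matrix.length (matrix.getD 0 []).length).2 r hr] at hc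
    have hval := gv_grid_foldl (matrix.getD 0 []).length matrix.length
      (fun i j => ((j, i), gv matrix j ((matrix.getD 0 []).length - 1 - i)))
      (pvZeros matrix.length (matrix.getD 0 []).length) r c c r
      (by simp [pvZeros]; exact hr)
      (by rw [(pvShape_zeros matrix.length (matrix.getD 0 []).length).2 r hr]; exact hc)
      hc hr
      (by intro i hi j hj; simp only [Prod.mk.injEq]; constructor <;> (intro h; exact ⟨h.2, h.1⟩))
    rw [hval]
    unfold gv
    rw [getD_map_rev matrix r hr, getD_reverse_row _ c (by rw [hL r hr]; exact hc), hL r hr]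

theorem minlen_rect (l : List (List Int)) (L : Nat) (hne : l ≠ [])
    (h : ∀ row ∈ l, row.length = L) :
    ((l.map List.length).min?.getD 0) = L := by
  obtain ⟨a, l', rfl⟩ := List.exists_cons_of_ne_nil hne
  have hmin : ((a :: l').map List.length).min? = some L := by
    rw [List.min?_eq_some_iff]
    constructor
    · exact List.mem_map.mpr ⟨a, List.mem_cons_self, h a List.mem_cons_self⟩
    · intro b hb
      obtain ⟨row, hrow, rfl⟩ := List.mem_map.mp hb
      rw [h row hrow]
  rw [hmin]
  rfl

theorem length_pvZip (l : List (List Int)) (L : Nat) (hne : l ≠ [])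
    (h : ∀ row ∈ l, row.length = L) : (pvZip l).length = L := by
  unfold pvZip
  rw [minlen_rect l L hne h]
  simp

theorem rowlen_pvZip (l : List (List Int)) (L : Nat) (hne : l ≠ [])
    (h : ∀ row ∈ l, row.length = L) (r : Nat) (hr : r < L) :
    ((pvZip l).getD r []).length = l.length := by
  unfold pvZip
  rw [minlen_rect l L hne h, List.getD_eq_getElem?_getD, List.getElem?_map,
    List.getElem?_range (by exact hr)]
  simp

theorem gv_pvZip (l : List (List Int)) (L : Nat) (hne : l ≠ [])
    (h : ∀ row ∈ l, row.length = L) (r c : Nat) (hr : r < L) (hc : c < l.length) :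
    gv (pvZip l) r c = gv l c r := by
  unfold pvZip gv
  rw [minlen_rect l L hne h]
  rw [List.getD_eq_getElem?_getD (l := (List.range L).map _), List.getElem?_map,
    List.getElem?_range (by exact hr)]
  simp only [Option.map_some, Option.getD_some]
  rw [List.getD_eq_getElem?_getD (l := l.map _), List.getElem?_map, List.getElem?_eq_getElem hc]
  simp only [Option.map_some, Option.getD_some]
  rw [List.getD_eq_getElem?_getD (l := l), List.getElem?_eq_getElem hc]
  rfl

theorem method3_eq (matrix : List (List Int)) (hne : matrix ≠ [])
    (hrect : ∀ row ∈ matrix, row.length = matrix.headI.length) :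
    func 3 matrix = func_alt 3 matrix := by
  have hL := rect_rowlen matrix hne hrect
  rw [headI_eq_getD matrix hne] at hL
  have hnerev : matrix.reverse ≠ [] := by simpa using hne
  have hrev : ∀ row ∈ matrix.reverse, row.length = (matrix.getD 0 []).length := by
    intro row hrow
    rw [headI_eq_getD matrix hne] at hrect
    exact hrect row (List.mem_reverse.mp hrow)
  have hAlt : func_alt 3 matrix = pvZip matrix.reverse := by
    simp only [func_alt, Int.reduceEq, reduceIte]
    rw [PySem.List.slice?_none_none_neg_one]
    rfl
  have hA : func 3 matrix =
      (grid (matrix.getD 0 []).length matrix.length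
        (fun i j => ((i, matrix.length - 1 - j), gv matrix j i))).foldl app
        (pvZeros (matrix.getD 0 []).length matrix.length) := by
    simp only [func, Int.reduceEq, reduceIte]
    rw [PySem.List.pyGetD_zero]
    exact nested_eq_grid (matrix.getD 0 []).length matrix.length (matrix.getD 0 []).length matrix.length
      (fun (nm : List (List Int)) (i j : Nat) => pvSetCell nm ↑i (-(↑j + 1)) (pvGetCell matrix ↑j ↑i))
      (fun i j => ((i, matrix.length - 1 - j), gv matrix j i))
      (pvZeros (matrix.getD 0 []).length matrix.length)
      (pvShape_zeros _ _)
      (by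
        intro nm i j hnm hi hj
        beta_reduce
        have hrow : (nm.getD i []).length = matrix.length := hnm.2 i hi
        have hcast : (-((j : Int) + 1)) = -(((j + 1 : Nat) : Int)) := by push_cast; ring
        unfold pvSetCell
        rw [hcast, pySetD_neg_natCast _ (j + 1) _ (by omega) (by rw [PySem.List.pyGetD_natCast]; rw [hrow]; omega)]
        rw [PySem.List.pyGetD_natCast, hrow]
        have hidx : matrix.length - (j + 1) = matrix.length - 1 - j := by omega
        rw [hidx]
        simp [app, pvGetCell, gv])
  rw [hA, hAlt]
  apply ext_gv
  · rw [length_foldl_app]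
    rw [length_pvZip matrix.reverse (matrix.getD 0 []).length hnerev hrev]
    simp [pvZeros]
  · intro r hr
    rw [length_foldl_app] at hr; simp [pvZeros] at hr
    rw [rowlen_foldl_app, (pvShape_zeros (matrix.getD 0 []).length matrix.length).2 r hr,
      rowlen_pvZip matrix.reverse (matrix.getD 0 []).length hnerev hrev r hr]
    simp
  · intro r c hr hc
    rw [length_foldl_app] at hr; simp [pvZeros] at hr
    rw [rowlen_foldl_app, (pvShape_zeros (matrix.getD 0 []).length matrix.length).2 r hr] at hc
    have hval := gv_grid_foldl (matrix.getD 0 []).length matrix.length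
      (fun i j => ((i, matrix.length - 1 - j), gv matrix j i))
      (pvZeros (matrix.getD 0 []).length matrix.length) r c r (matrix.length - 1 - c)
      (by simp [pvZeros]; exact hr)
      (by rw [(pvShape_zeros (matrix.getD 0 []).length matrix.length).2 r hr]; exact hc)
      hr (by omega)
      (by intro i hi j hj; simp only [Prod.mk.injEq]; omega)
    rw [hval]
    rw [gv_pvZip matrix.reverse (matrix.getD 0 []).length hnerev hrev r c hr (by simpa using hc)]
    rw [gv_reverse matrix c r (by simpa using hc)]

theorem method4_eq (matrix : List (List Int)) (hne : matrix ≠ [])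
    (hrect : ∀ row ∈ matrix, row.length = matrix.headI.length) :
    func 4 matrix = func_alt 4 matrix := by
  have hL := rect_rowlen matrix hne hrect
  rw [headI_eq_getD matrix hne] at hL
  have hrect' : ∀ row ∈ matrix, row.length = (matrix.getD 0 []).length := by
    rw [← headI_eq_getD matrix hne]; exact hrect
  have hAlt : func_alt 4 matrix = (pvZip matrix).reverse := by
    simp only [func_alt, Int.reduceEq, reduceIte]
    rw [PySem.List.slice?_none_none_neg_one]
    rfl
  have hA : func 4 matrix =
      (grid (matrix.getD 0 []).length matrix.length
        (fun i j => (((matrix.getD 0 []).length - 1 - i, j), gv matrix j i))).foldl app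
        (pvZeros (matrix.getD 0 []).length matrix.length) := by
    simp only [func, Int.reduceEq, reduceIte]
    rw [PySem.List.pyGetD_zero]
    exact nested_eq_grid (matrix.getD 0 []).length matrix.length (matrix.getD 0 []).length matrix.length
      (fun (nm : List (List Int)) (i j : Nat) => pvSetCell nm (-(↑i + 1)) ↑j (pvGetCell matrix ↑j ↑i))
      (fun i j => (((matrix.getD 0 []).length - 1 - i, j), gv matrix j i))
      (pvZeros (matrix.getD 0 []).length matrix.length)
      (pvShape_zeros _ _)
      (by
        intro nm i j hnm hi hj
        beta_reduce
        have hcast : (-((i : Int) + 1)) = -(((i + 1 : Nat) : Int)) := by push_cast; ring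
        unfold pvSetCell
        rw [pyGetD_negsucc nm i (by rw [hnm.1]; omega)]
        rw [hcast, pySetD_neg_natCast _ (i + 1) _ (by omega) (by rw [hnm.1]; omega)]
        rw [hnm.1]
        have hidx : (matrix.getD 0 []).length - (i + 1) = (matrix.getD 0 []).length - 1 - i := by omega
        rw [hidx]
        simp [app, pvGetCell, gv])
  rw [hA, hAlt]
  apply ext_gv
  · rw [length_foldl_app, List.length_reverse,
      length_pvZip matrix (matrix.getD 0 []).length hne hrect']
    simp [pvZeros]
  · intro r hr
    rw [length_foldl_app] at hr; simp [pvZeros] at hr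
    rw [← List.getD_eq_getElem?_getD] at hr
    rw [rowlen_foldl_app, (pvShape_zeros (matrix.getD 0 []).length matrix.length).2 r hr]
    have hrlen : (pvZip matrix).length = (matrix.getD 0 []).length :=
      length_pvZip matrix (matrix.getD 0 []).length hne hrect'
    rw [List.getD_eq_getElem?_getD (l := (pvZip matrix).reverse),
      List.getElem?_reverse (by rw [hrlen]; exact hr),
      ← List.getD_eq_getElem?_getD, hrlen]
    rw [rowlen_pvZip matrix (matrix.getD 0 []).length hne hrect' _ (by omega)]
  · intro r c hr hc
    rw [length_foldl_app] at hr; simp [pvZeros] at hr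
    rw [← List.getD_eq_getElem?_getD] at hr
    rw [rowlen_foldl_app, (pvShape_zeros (matrix.getD 0 []).length matrix.length).2 r hr] at hc
    have hval := gv_grid_foldl (matrix.getD 0 []).length matrix.length
      (fun i j => (((matrix.getD 0 []).length - 1 - i, j), gv matrix j i))
      (pvZeros (matrix.getD 0 []).length matrix.length) r c ((matrix.getD 0 []).length - 1 - r) c
      (by simp [pvZeros]; exact hr)
      (by rw [(pvShape_zeros (matrix.getD 0 []).length matrix.length).2 r hr]; exact hc)
      (by omega) hc
      (by intro i hi j hj; simp only [Prod.mk.injEq]; omega)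
    rw [hval]
    have hrlen : (pvZip matrix).length = (matrix.getD 0 []).length :=
      length_pvZip matrix (matrix.getD 0 []).length hne hrect'
    rw [gv_reverse (pvZip matrix) r c (by omega), hrlen]
    rw [gv_pvZip matrix (matrix.getD 0 []).length hne hrect' _ c (by omega) hc]
theorem len_two_blocks (c2 CS : Nat) (hc : c2 ≤ CS) (g1 g2 : Int → List Int) :
    (((PySem.List.pyRange 0 (c2 : Int) 1).map g1) ++ ((PySem.List.pyRange (c2 : Int) (CS : Int) 1).map g2)).length = CS := by
  simp [PySem.List.length_pyRange_one]
  omega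

theorem getD_two_blocks_lo (c2 CS : Nat) (g1 g2 : Int → List Int) (r : Nat) (hr : r < c2) :
    (((PySem.List.pyRange 0 (c2 : Int) 1).map g1) ++ ((PySem.List.pyRange (c2 : Int) (CS : Int) 1).map g2)).getD r []
      = g1 (r : Int) := by
  rw [List.getD_eq_getElem?_getD,
    List.getElem?_append_left (by simp [PySem.List.length_pyRange_one]; omega),
    PySem.List.getElem?_map_pyRange_zero g1 c2 r hr]
  rfl

theorem getD_two_blocks_hi (c2 CS : Nat) (g1 g2 : Int → List Int) (r : Nat) (hlo : c2 ≤ r) (hhi : r < CS) :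
    (((PySem.List.pyRange 0 (c2 : Int) 1).map g1) ++ ((PySem.List.pyRange (c2 : Int) (CS : Int) 1).map g2)).getD r []
      = g2 (r : Int) := by
  rw [List.getD_eq_getElem?_getD,
    List.getElem?_append_right (by simp [PySem.List.length_pyRange_one]; omega)]
  rw [PySem.List.pyRange_one, List.map_map]
  have hlen : ((PySem.List.pyRange 0 (c2 : Int) 1).map g1).length = c2 := by
    simp [PySem.List.length_pyRange_one]
  rw [hlen, List.getElem?_map, List.getElem?_range (by omega : r - c2 < ((CS : Int) - (c2 : Int)).toNat)]
  simp only [Option.map_some, Option.getD_some, Function.comp_apply]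
  congr 1
  omega

theorem row_take_take (rowA rowB : List Int) (r2 : Nat) (hA : r2 ≤ rowA.length) (c : Nat)
    (hc : c < r2 + r2) :
    (rowA.take r2 ++ rowB.take r2).getD c 0
      = if c < r2 then rowA.getD c 0 else rowB.getD (c - r2) 0 := by
  by_cases h : c < r2
  · rw [List.getD_eq_getElem?_getD, List.getElem?_append_left (by simp; omega),
      List.getElem?_take, if_pos h, if_pos h, ← List.getD_eq_getElem?_getD]
  · rw [List.getD_eq_getElem?_getD, List.getElem?_append_right (by simp; omega)]
    have hlen : (rowA.take r2).length = r2 := by simp; omega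
    rw [hlen, List.getElem?_take, if_pos (by omega), if_neg h, ← List.getD_eq_getElem?_getD]

theorem row_drop_drop (rowA rowB : List Int) (r2 : Nat) (hA : rowA.length = r2 + r2) (c : Nat)
    (hc : c < r2 + r2) :
    (rowA.drop r2 ++ rowB.drop r2).getD c 0
      = if c < r2 then rowA.getD (r2 + c) 0 else rowB.getD (r2 + (c - r2)) 0 := by
  by_cases h : c < r2
  · rw [List.getD_eq_getElem?_getD, List.getElem?_append_left (by simp; omega),
      List.getElem?_drop, if_pos h, ← List.getD_eq_getElem?_getD]
  · rw [List.getD_eq_getElem?_getD, List.getElem?_append_right (by simp; omega)]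
    have hlen : (rowA.drop r2).length = r2 := by simp; omega
    rw [hlen, List.getElem?_drop, if_neg h, ← List.getD_eq_getElem?_getD]

theorem method5_eq (matrix : List (List Int)) (hne : matrix ≠ [])
    (hrect : ∀ row ∈ matrix, row.length = matrix.headI.length)
    (hCSe : matrix.length % 2 = 0) (hRSe : (matrix.getD 0 []).length % 2 = 0) :
    func 5 matrix = func_alt 5 matrix := by
  have hL := rect_rowlen matrix hne hrect
  rw [headI_eq_getD matrix hne] at hL
  have hA : func 5 matrix = (grid matrix.length (matrix.getD 0 []).length
      (fun j i => ((if i < (matrix.getD 0 []).length / 2 ∧ j < matrix.length / 2 then (j, i + (matrix.getD 0 []).length / 2)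
          else if (matrix.getD 0 []).length / 2 ≤ i ∧ j < matrix.length / 2 then (j + matrix.length / 2, i)
          else if (matrix.getD 0 []).length / 2 ≤ i ∧ matrix.length / 2 ≤ j then (j, i - (matrix.getD 0 []).length / 2)
          else (j - matrix.length / 2, i)), gv matrix j i))).foldl app
      (pvZeros matrix.length (matrix.getD 0 []).length) := by
    simp only [func, Int.reduceEq, reduceIte]
    rw [PySem.List.pyGetD_zero]
    exact nested_eq_grid matrix.length (matrix.getD 0 []).length matrix.length (matrix.getD 0 []).length
      (fun (nm : List (List Int)) (j i : Nat) =>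
        if i < (matrix.getD 0 []).length / 2 ∧ j < matrix.length / 2 then
          pvSetCell nm ↑j (↑i + ↑((matrix.getD 0 []).length / 2)) (pvGetCell matrix ↑j ↑i)
        else if (matrix.getD 0 []).length / 2 ≤ i ∧ j < matrix.length / 2 then
          pvSetCell nm (↑j + ↑(matrix.length / 2)) ↑i (pvGetCell matrix ↑j ↑i)
        else if (matrix.getD 0 []).length / 2 ≤ i ∧ matrix.length / 2 ≤ j then
          pvSetCell nm ↑j (↑i - ↑((matrix.getD 0 []).length / 2)) (pvGetCell matrix ↑j ↑i)
        else pvSetCell nm (↑j - ↑(matrix.length / 2)) ↑i (pvGetCell matrix ↑j ↑i))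
      (fun j i => ((if i < (matrix.getD 0 []).length / 2 ∧ j < matrix.length / 2 then (j, i + (matrix.getD 0 []).length / 2)
          else if (matrix.getD 0 []).length / 2 ≤ i ∧ j < matrix.length / 2 then (j + matrix.length / 2, i)
          else if (matrix.getD 0 []).length / 2 ≤ i ∧ matrix.length / 2 ≤ j then (j, i - (matrix.getD 0 []).length / 2)
          else (j - matrix.length / 2, i)), gv matrix j i))
      (pvZeros matrix.length (matrix.getD 0 []).length)
      (pvShape_zeros _ _)
      (by
        intro nm j i hnm hj hi
        beta_reduce
        rw [pvGetCell_natCast]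
        split_ifs with h1 h2 h3
        · rw [show ((i : Int) + ↑((matrix.getD 0 []).length / 2)) = (((i + (matrix.getD 0 []).length / 2 : Nat)) : Int) from by push_cast; ring]
          exact pvSetCell_natCast _ _ _ _
        · rw [show ((j : Int) + ↑(matrix.length / 2)) = (((j + matrix.length / 2 : Nat)) : Int) from by push_cast; ring]
          exact pvSetCell_natCast _ _ _ _
        · rw [show ((i : Int) - ↑((matrix.getD 0 []).length / 2)) = (((i - (matrix.getD 0 []).length / 2 : Nat)) : Int) from by omega]
          exact pvSetCell_natCast _ _ _ _
        · rw [show ((j : Int) - ↑(matrix.length / 2)) = (((j - matrix.length / 2 : Nat)) : Int) from by omega]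
          exact pvSetCell_natCast _ _ _ _)
  have hAlt : func_alt 5 matrix =
      ((PySem.List.pyRange 0 (↑(matrix.length / 2) : Int) 1).map (fun j => PySem.List.slice (PySem.List.pyGetD matrix (j + ↑(matrix.length / 2)) []) none (some ↑((matrix.getD 0 []).length / 2))
          ++ PySem.List.slice (PySem.List.pyGetD matrix j []) none (some ↑((matrix.getD 0 []).length / 2))))
      ++ ((PySem.List.pyRange (↑(matrix.length / 2) : Int) (↑matrix.length : Int) 1).map (fun j => PySem.List.slice (PySem.List.pyGetD matrix j []) (some ↑((matrix.getD 0 []).length / 2)) none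
          ++ PySem.List.slice (PySem.List.pyGetD matrix (j - ↑(matrix.length / 2)) []) (some ↑((matrix.getD 0 []).length / 2)) none)) := by
    simp only [func_alt, Int.reduceEq, reduceIte]
    rw [PySem.List.pyGetD_zero]
  rw [hA, hAlt]
  apply ext_gv
  · rw [length_foldl_app, len_two_blocks (matrix.length / 2) matrix.length (by omega)]
    simp [pvZeros]
  · intro r hr
    rw [length_foldl_app] at hr; simp [pvZeros] at hr
    rw [rowlen_foldl_app, (pvShape_zeros matrix.length (matrix.getD 0 []).length).2 r hr]
    by_cases hrlo : r < matrix.length / 2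
    · rw [getD_two_blocks_lo (matrix.length / 2) matrix.length _ _ r hrlo]
      rw [show ((r : Int) + ↑(matrix.length / 2)) = (((r + matrix.length / 2 : Nat)) : Int) from by push_cast; ring]
      rw [PySem.List.pyGetD_natCast, PySem.List.pyGetD_natCast,
        PySem.List.slice_to_natCast, PySem.List.slice_to_natCast]
      rw [List.length_append, List.length_take, List.length_take,
        hL (r + matrix.length / 2) (by omega), hL r (by omega)]
      omega
    · rw [getD_two_blocks_hi (matrix.length / 2) matrix.length _ _ r (by omega) hr]
      rw [show ((r : Int) - ↑(matrix.length / 2)) = (((r - matrix.length / 2 : Nat)) : Int) from by omega]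
      rw [PySem.List.pyGetD_natCast, PySem.List.pyGetD_natCast,
        PySem.List.slice_from_natCast, PySem.List.slice_from_natCast]
      rw [List.length_append, List.length_drop, List.length_drop,
        hL (r - matrix.length / 2) (by omega), hL r (by omega)]
      omega
  · intro r c hr hc
    rw [length_foldl_app] at hr; simp [pvZeros] at hr
    rw [rowlen_foldl_app, (pvShape_zeros matrix.length (matrix.getD 0 []).length).2 r hr] at hc
    by_cases hrlo : r < matrix.length / 2 <;> by_cases hclo : c < (matrix.getD 0 []).length / 2
    · -- r < c2, c < r2 : source (r + c2, c)
      have hval := gv_grid_foldl matrix.length (matrix.getD 0 []).length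
        (fun j i => ((if i < (matrix.getD 0 []).length / 2 ∧ j < matrix.length / 2 then (j, i + (matrix.getD 0 []).length / 2)
          else if (matrix.getD 0 []).length / 2 ≤ i ∧ j < matrix.length / 2 then (j + matrix.length / 2, i)
          else if (matrix.getD 0 []).length / 2 ≤ i ∧ matrix.length / 2 ≤ j then (j, i - (matrix.getD 0 []).length / 2)
          else (j - matrix.length / 2, i)), gv matrix j i))
        (pvZeros matrix.length (matrix.getD 0 []).length) r c (r + matrix.length / 2) (c)
        (by simp [pvZeros]; exact hr)
        (by rw [(pvShape_zeros matrix.length (matrix.getD 0 []).length).2 r hr]; exact hc)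
        (by omega) (by omega)
        (by
          intro j hj i hi
          dsimp only
          split_ifs <;> simp only [Prod.mk.injEq] <;> omega)
      rw [hval]
      dsimp only
      unfold gv
      rw [getD_two_blocks_lo (matrix.length / 2) matrix.length _ _ r hrlo]
      rw [show ((r : Int) + ↑(matrix.length / 2)) = (((r + matrix.length / 2 : Nat)) : Int) from by push_cast; ring]
      rw [PySem.List.pyGetD_natCast, PySem.List.pyGetD_natCast,
        PySem.List.slice_to_natCast, PySem.List.slice_to_natCast]
      rw [row_take_take _ _ ((matrix.getD 0 []).length / 2) (by rw [hL (r + matrix.length / 2) (by omega)]; omega) c (by omega)]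
      rw [if_pos hclo]
    · -- r < c2, c ≥ r2 : source (r, c - r2)
      have hval := gv_grid_foldl matrix.length (matrix.getD 0 []).length
        (fun j i => ((if i < (matrix.getD 0 []).length / 2 ∧ j < matrix.length / 2 then (j, i + (matrix.getD 0 []).length / 2)
          else if (matrix.getD 0 []).length / 2 ≤ i ∧ j < matrix.length / 2 then (j + matrix.length / 2, i)
          else if (matrix.getD 0 []).length / 2 ≤ i ∧ matrix.length / 2 ≤ j then (j, i - (matrix.getD 0 []).length / 2)
          else (j - matrix.length / 2, i)), gv matrix j i))
        (pvZeros matrix.length (matrix.getD 0 []).length) r c (r) (c - (matrix.getD 0 []).length / 2)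
        (by simp [pvZeros]; exact hr)
        (by rw [(pvShape_zeros matrix.length (matrix.getD 0 []).length).2 r hr]; exact hc)
        (by omega) (by omega)
        (by
          intro j hj i hi
          dsimp only
          split_ifs <;> simp only [Prod.mk.injEq] <;> omega)
      rw [hval]
      dsimp only
      unfold gv
      rw [getD_two_blocks_lo (matrix.length / 2) matrix.length _ _ r hrlo]
      rw [show ((r : Int) + ↑(matrix.length / 2)) = (((r + matrix.length / 2 : Nat)) : Int) from by push_cast; ring]
      rw [PySem.List.pyGetD_natCast, PySem.List.pyGetD_natCast,
        PySem.List.slice_to_natCast, PySem.List.slice_to_natCast]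
      rw [row_take_take _ _ ((matrix.getD 0 []).length / 2) (by rw [hL (r + matrix.length / 2) (by omega)]; omega) c (by omega)]
      rw [if_neg hclo]
    · -- r ≥ c2, c < r2 : source (r, r2 + c)
      have hval := gv_grid_foldl matrix.length (matrix.getD 0 []).length
        (fun j i => ((if i < (matrix.getD 0 []).length / 2 ∧ j < matrix.length / 2 then (j, i + (matrix.getD 0 []).length / 2)
          else if (matrix.getD 0 []).length / 2 ≤ i ∧ j < matrix.length / 2 then (j + matrix.length / 2, i)
          else if (matrix.getD 0 []).length / 2 ≤ i ∧ matrix.length / 2 ≤ j then (j, i - (matrix.getD 0 []).length / 2)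
          else (j - matrix.length / 2, i)), gv matrix j i))
        (pvZeros matrix.length (matrix.getD 0 []).length) r c (r) ((matrix.getD 0 []).length / 2 + c)
        (by simp [pvZeros]; exact hr)
        (by rw [(pvShape_zeros matrix.length (matrix.getD 0 []).length).2 r hr]; exact hc)
        (by omega) (by omega)
        (by
          intro j hj i hi
          dsimp only
          split_ifs <;> simp only [Prod.mk.injEq] <;> omega)
      rw [hval]
      dsimp only
      unfold gv
      rw [getD_two_blocks_hi (matrix.length / 2) matrix.length _ _ r (by omega) hr]
      rw [show ((r : Int) - ↑(matrix.length / 2)) = (((r - matrix.length / 2 : Nat)) : Int) from by omega]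
      rw [PySem.List.pyGetD_natCast, PySem.List.pyGetD_natCast,
        PySem.List.slice_from_natCast, PySem.List.slice_from_natCast]
      rw [row_drop_drop _ _ ((matrix.getD 0 []).length / 2) (by rw [hL r (by omega)]; omega) c (by omega)]
      rw [if_pos hclo]
    · -- r ≥ c2, c ≥ r2 : source (r - c2, c)
      have hval := gv_grid_foldl matrix.length (matrix.getD 0 []).length
        (fun j i => ((if i < (matrix.getD 0 []).length / 2 ∧ j < matrix.length / 2 then (j, i + (matrix.getD 0 []).length / 2)
          else if (matrix.getD 0 []).length / 2 ≤ i ∧ j < matrix.length / 2 then (j + matrix.length / 2, i)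
          else if (matrix.getD 0 []).length / 2 ≤ i ∧ matrix.length / 2 ≤ j then (j, i - (matrix.getD 0 []).length / 2)
          else (j - matrix.length / 2, i)), gv matrix j i))
        (pvZeros matrix.length (matrix.getD 0 []).length) r c (r - matrix.length / 2) (c)
        (by simp [pvZeros]; exact hr)
        (by rw [(pvShape_zeros matrix.length (matrix.getD 0 []).length).2 r hr]; exact hc)
        (by omega) (by omega)
        (by
          intro j hj i hi
          dsimp only
          split_ifs <;> simp only [Prod.mk.injEq] <;> omega)
      rw [hval]
      dsimp only
      unfold gv
      rw [getD_two_blocks_hi (matrix.length / 2) matrix.length _ _ r (by omega) hr]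
      rw [show ((r : Int) - ↑(matrix.length / 2)) = (((r - matrix.length / 2 : Nat)) : Int) from by omega]
      rw [PySem.List.pyGetD_natCast, PySem.List.pyGetD_natCast,
        PySem.List.slice_from_natCast, PySem.List.slice_from_natCast]
      rw [row_drop_drop _ _ ((matrix.getD 0 []).length / 2) (by rw [hL r (by omega)]; omega) c (by omega)]
      rw [if_neg hclo, show (matrix.getD 0 []).length / 2 + (c - (matrix.getD 0 []).length / 2) = c from by omega]

theorem method6_eq (matrix : List (List Int)) (hne : matrix ≠ [])
    (hrect : ∀ row ∈ matrix, row.length = matrix.headI.length)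
    (hCSe : matrix.length % 2 = 0) (hRSe : (matrix.getD 0 []).length % 2 = 0) :
    func 6 matrix = func_alt 6 matrix := by
  have hL := rect_rowlen matrix hne hrect
  rw [headI_eq_getD matrix hne] at hL
  have hA : func 6 matrix = (grid matrix.length (matrix.getD 0 []).length
      (fun j i => ((if i < (matrix.getD 0 []).length / 2 ∧ j < matrix.length / 2 then (j + matrix.length / 2, i)
          else if (matrix.getD 0 []).length / 2 ≤ i ∧ j < matrix.length / 2 then (j, i - (matrix.getD 0 []).length / 2)
          else if (matrix.getD 0 []).length / 2 ≤ i ∧ matrix.length / 2 ≤ j then (j - matrix.length / 2, i)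
          else (j, i + (matrix.getD 0 []).length / 2)), gv matrix j i))).foldl app
      (pvZeros matrix.length (matrix.getD 0 []).length) := by
    simp only [func, Int.reduceEq, reduceIte]
    rw [PySem.List.pyGetD_zero]
    exact nested_eq_grid matrix.length (matrix.getD 0 []).length matrix.length (matrix.getD 0 []).length
      (fun (nm : List (List Int)) (j i : Nat) =>
        if i < (matrix.getD 0 []).length / 2 ∧ j < matrix.length / 2 then
          pvSetCell nm (↑j + ↑(matrix.length / 2)) ↑i (pvGetCell matrix ↑j ↑i)
        else if (matrix.getD 0 []).length / 2 ≤ i ∧ j < matrix.length / 2 then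
          pvSetCell nm ↑j (↑i - ↑((matrix.getD 0 []).length / 2)) (pvGetCell matrix ↑j ↑i)
        else if (matrix.getD 0 []).length / 2 ≤ i ∧ matrix.length / 2 ≤ j then
          pvSetCell nm (↑j - ↑(matrix.length / 2)) ↑i (pvGetCell matrix ↑j ↑i)
        else pvSetCell nm ↑j (↑i + ↑((matrix.getD 0 []).length / 2)) (pvGetCell matrix ↑j ↑i))
      (fun j i => ((if i < (matrix.getD 0 []).length / 2 ∧ j < matrix.length / 2 then (j + matrix.length / 2, i)
          else if (matrix.getD 0 []).length / 2 ≤ i ∧ j < matrix.length / 2 then (j, i - (matrix.getD 0 []).length / 2)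
          else if (matrix.getD 0 []).length / 2 ≤ i ∧ matrix.length / 2 ≤ j then (j - matrix.length / 2, i)
          else (j, i + (matrix.getD 0 []).length / 2)), gv matrix j i))
      (pvZeros matrix.length (matrix.getD 0 []).length)
      (pvShape_zeros _ _)
      (by
        intro nm j i hnm hj hi
        beta_reduce
        rw [pvGetCell_natCast]
        split_ifs with h1 h2 h3
        · rw [show ((j : Int) + ↑(matrix.length / 2)) = (((j + matrix.length / 2 : Nat)) : Int) from by push_cast; ring]
          exact pvSetCell_natCast _ _ _ _
        · rw [show ((i : Int) - ↑((matrix.getD 0 []).length / 2)) = (((i - (matrix.getD 0 []).length / 2 : Nat)) : Int) from by omega]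
          exact pvSetCell_natCast _ _ _ _
        · rw [show ((j : Int) - ↑(matrix.length / 2)) = (((j - matrix.length / 2 : Nat)) : Int) from by omega]
          exact pvSetCell_natCast _ _ _ _
        · rw [show ((i : Int) + ↑((matrix.getD 0 []).length / 2)) = (((i + (matrix.getD 0 []).length / 2 : Nat)) : Int) from by push_cast; ring]
          exact pvSetCell_natCast _ _ _ _)
  have hAlt : func_alt 6 matrix =
      ((PySem.List.pyRange 0 (↑(matrix.length / 2) : Int) 1).map (fun j => PySem.List.slice (PySem.List.pyGetD matrix j []) (some ↑((matrix.getD 0 []).length / 2)) none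
          ++ PySem.List.slice (PySem.List.pyGetD matrix (j + ↑(matrix.length / 2)) []) (some ↑((matrix.getD 0 []).length / 2)) none))
      ++ ((PySem.List.pyRange (↑(matrix.length / 2) : Int) (↑matrix.length : Int) 1).map (fun j => PySem.List.slice (PySem.List.pyGetD matrix (j - ↑(matrix.length / 2)) []) none (some ↑((matrix.getD 0 []).length / 2))
          ++ PySem.List.slice (PySem.List.pyGetD matrix j []) none (some ↑((matrix.getD 0 []).length / 2)))) := by
    simp only [func_alt, Int.reduceEq, reduceIte]
    rw [PySem.List.pyGetD_zero]
  rw [hA, hAlt]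
  apply ext_gv
  · rw [length_foldl_app, len_two_blocks (matrix.length / 2) matrix.length (by omega)]
    simp [pvZeros]
  · intro r hr
    rw [length_foldl_app] at hr; simp [pvZeros] at hr
    rw [rowlen_foldl_app, (pvShape_zeros matrix.length (matrix.getD 0 []).length).2 r hr]
    by_cases hrlo : r < matrix.length / 2
    · rw [getD_two_blocks_lo (matrix.length / 2) matrix.length _ _ r hrlo]
      rw [show ((r : Int) + ↑(matrix.length / 2)) = (((r + matrix.length / 2 : Nat)) : Int) from by push_cast; ring]
      rw [PySem.List.pyGetD_natCast, PySem.List.pyGetD_natCast,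
        PySem.List.slice_from_natCast, PySem.List.slice_from_natCast]
      rw [List.length_append, List.length_drop, List.length_drop,
        hL (r + matrix.length / 2) (by omega), hL r (by omega)]
      omega
    · rw [getD_two_blocks_hi (matrix.length / 2) matrix.length _ _ r (by omega) hr]
      rw [show ((r : Int) - ↑(matrix.length / 2)) = (((r - matrix.length / 2 : Nat)) : Int) from by omega]
      rw [PySem.List.pyGetD_natCast, PySem.List.pyGetD_natCast,
        PySem.List.slice_to_natCast, PySem.List.slice_to_natCast]
      rw [List.length_append, List.length_take, List.length_take,
        hL (r - matrix.length / 2) (by omega), hL r (by omega)]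
      omega
  · intro r c hr hc
    rw [length_foldl_app] at hr; simp [pvZeros] at hr
    rw [rowlen_foldl_app, (pvShape_zeros matrix.length (matrix.getD 0 []).length).2 r hr] at hc
    by_cases hrlo : r < matrix.length / 2 <;> by_cases hclo : c < (matrix.getD 0 []).length / 2
    · -- r < c2, c < r2 : source (r, r2 + c)
      have hval := gv_grid_foldl matrix.length (matrix.getD 0 []).length
        (fun j i => ((if i < (matrix.getD 0 []).length / 2 ∧ j < matrix.length / 2 then (j + matrix.length / 2, i)
          else if (matrix.getD 0 []).length / 2 ≤ i ∧ j < matrix.length / 2 then (j, i - (matrix.getD 0 []).length / 2)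
          else if (matrix.getD 0 []).length / 2 ≤ i ∧ matrix.length / 2 ≤ j then (j - matrix.length / 2, i)
          else (j, i + (matrix.getD 0 []).length / 2)), gv matrix j i))
        (pvZeros matrix.length (matrix.getD 0 []).length) r c (r) ((matrix.getD 0 []).length / 2 + c)
        (by simp [pvZeros]; exact hr)
        (by rw [(pvShape_zeros matrix.length (matrix.getD 0 []).length).2 r hr]; exact hc)
        (by omega) (by omega)
        (by
          intro j hj i hi
          dsimp only
          split_ifs <;> simp only [Prod.mk.injEq] <;> omega)
      rw [hval]
      dsimp only
      unfold gv
      rw [getD_two_blocks_lo (matrix.length / 2) matrix.length _ _ r hrlo]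
      rw [show ((r : Int) + ↑(matrix.length / 2)) = (((r + matrix.length / 2 : Nat)) : Int) from by push_cast; ring]
      rw [PySem.List.pyGetD_natCast, PySem.List.pyGetD_natCast,
        PySem.List.slice_from_natCast, PySem.List.slice_from_natCast]
      rw [row_drop_drop _ _ ((matrix.getD 0 []).length / 2) (by rw [hL r (by omega)]; omega) c (by omega)]
      rw [if_pos hclo]
    · -- r < c2, c ≥ r2 : source (r + c2, c)
      have hval := gv_grid_foldl matrix.length (matrix.getD 0 []).length
        (fun j i => ((if i < (matrix.getD 0 []).length / 2 ∧ j < matrix.length / 2 then (j + matrix.length / 2, i)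
          else if (matrix.getD 0 []).length / 2 ≤ i ∧ j < matrix.length / 2 then (j, i - (matrix.getD 0 []).length / 2)
          else if (matrix.getD 0 []).length / 2 ≤ i ∧ matrix.length / 2 ≤ j then (j - matrix.length / 2, i)
          else (j, i + (matrix.getD 0 []).length / 2)), gv matrix j i))
        (pvZeros matrix.length (matrix.getD 0 []).length) r c (r + matrix.length / 2) (c)
        (by simp [pvZeros]; exact hr)
        (by rw [(pvShape_zeros matrix.length (matrix.getD 0 []).length).2 r hr]; exact hc)
        (by omega) (by omega)
        (by
          intro j hj i hi
          dsimp only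
          split_ifs <;> simp only [Prod.mk.injEq] <;> omega)
      rw [hval]
      dsimp only
      unfold gv
      rw [getD_two_blocks_lo (matrix.length / 2) matrix.length _ _ r hrlo]
      rw [show ((r : Int) + ↑(matrix.length / 2)) = (((r + matrix.length / 2 : Nat)) : Int) from by push_cast; ring]
      rw [PySem.List.pyGetD_natCast, PySem.List.pyGetD_natCast,
        PySem.List.slice_from_natCast, PySem.List.slice_from_natCast]
      rw [row_drop_drop _ _ ((matrix.getD 0 []).length / 2) (by rw [hL r (by omega)]; omega) c (by omega)]
      rw [if_neg hclo, show (matrix.getD 0 []).length / 2 + (c - (matrix.getD 0 []).length / 2) = c from by omega]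
    · -- r ≥ c2, c < r2 : source (r - c2, c)
      have hval := gv_grid_foldl matrix.length (matrix.getD 0 []).length
        (fun j i => ((if i < (matrix.getD 0 []).length / 2 ∧ j < matrix.length / 2 then (j + matrix.length / 2, i)
          else if (matrix.getD 0 []).length / 2 ≤ i ∧ j < matrix.length / 2 then (j, i - (matrix.getD 0 []).length / 2)
          else if (matrix.getD 0 []).length / 2 ≤ i ∧ matrix.length / 2 ≤ j then (j - matrix.length / 2, i)
          else (j, i + (matrix.getD 0 []).length / 2)), gv matrix j i))
        (pvZeros matrix.length (matrix.getD 0 []).length) r c (r - matrix.length / 2) (c)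
        (by simp [pvZeros]; exact hr)
        (by rw [(pvShape_zeros matrix.length (matrix.getD 0 []).length).2 r hr]; exact hc)
        (by omega) (by omega)
        (by
          intro j hj i hi
          dsimp only
          split_ifs <;> simp only [Prod.mk.injEq] <;> omega)
      rw [hval]
      dsimp only
      unfold gv
      rw [getD_two_blocks_hi (matrix.length / 2) matrix.length _ _ r (by omega) hr]
      rw [show ((r : Int) - ↑(matrix.length / 2)) = (((r - matrix.length / 2 : Nat)) : Int) from by omega]
      rw [PySem.List.pyGetD_natCast, PySem.List.pyGetD_natCast,
        PySem.List.slice_to_natCast, PySem.List.slice_to_natCast]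
      rw [row_take_take _ _ ((matrix.getD 0 []).length / 2) (by rw [hL (r - matrix.length / 2) (by omega)]; omega) c (by omega)]
      rw [if_pos hclo]
    · -- r ≥ c2, c ≥ r2 : source (r, c - r2)
      have hval := gv_grid_foldl matrix.length (matrix.getD 0 []).length
        (fun j i => ((if i < (matrix.getD 0 []).length / 2 ∧ j < matrix.length / 2 then (j + matrix.length / 2, i)
          else if (matrix.getD 0 []).length / 2 ≤ i ∧ j < matrix.length / 2 then (j, i - (matrix.getD 0 []).length / 2)
          else if (matrix.getD 0 []).length / 2 ≤ i ∧ matrix.length / 2 ≤ j then (j - matrix.length / 2, i)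
          else (j, i + (matrix.getD 0 []).length / 2)), gv matrix j i))
        (pvZeros matrix.length (matrix.getD 0 []).length) r c (r) (c - (matrix.getD 0 []).length / 2)
        (by simp [pvZeros]; exact hr)
        (by rw [(pvShape_zeros matrix.length (matrix.getD 0 []).length).2 r hr]; exact hc)
        (by omega) (by omega)
        (by
          intro j hj i hi
          dsimp only
          split_ifs <;> simp only [Prod.mk.injEq] <;> omega)
      rw [hval]
      dsimp only
      unfold gv
      rw [getD_two_blocks_hi (matrix.length / 2) matrix.length _ _ r (by omega) hr]
      rw [show ((r : Int) - ↑(matrix.length / 2)) = (((r - matrix.length / 2 : Nat)) : Int) from by omega]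
      rw [PySem.List.pyGetD_natCast, PySem.List.pyGetD_natCast,
        PySem.List.slice_to_natCast, PySem.List.slice_to_natCast]
      rw [row_take_take _ _ ((matrix.getD 0 []).length / 2) (by rw [hL (r - matrix.length / 2) (by omega)]; omega) c (by omega)]
      rw [if_neg hclo]

-- ===== VERDICT (by name: the statement is the Claim_ definition above) =====
theorem func_spec : Claim_equal_func := by
  intro method matrix hdom hpre
  unfold Spec_func
  obtain ⟨h1, h2, hne, hrect, heven⟩ := hpre
  have hm : method = 1 ∨ method = 2 ∨ method = 3 ∨ method = 4 ∨ method = 5 ∨ method = 6 := by omega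
  rcases hm with rfl | rfl | rfl | rfl | rfl | rfl
  · exact method1_eq matrix hne hrect
  · exact method2_eq matrix hne hrect
  · exact method3_eq matrix hne hrect
  · exact method4_eq matrix hne hrect
  · have he := heven (Or.inl rfl)
    rw [headI_eq_getD matrix hne] at he
    exact method5_eq matrix hne hrect he.1 he.2
  · have he := heven (Or.inr rfl)
    rw [headI_eq_getD matrix hne] at he
    exact method6_eq matrix hne hrect he.1 he.2
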